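-- pv_equiv track=rewrite | github.com/YoonTaeMinnnn/Algorithm | 프로그래머스/과일장수.py | solution
-- ===== SOURCE A (Python) =====
-- def solution(k, m, score):
--     answer = 0
--     s = len(score)
--     n = s // m
--     score.sort(reverse = True)
--     result = []
--     com = 0
--     for _ in range(n):
--         l = score[com:com+m]
--         answer += min(l)*m
--         com = com + m
--
--     return answer
-- ===== SOURCE B (Python) =====
-- def solution(k, m, score):
--     # Ascending sort; the remainder len(score) % m smallest scores are the ones
--     # that fit no full box, and from there every m-th element is a box minimum.
--     return m * sum(sorted(score)[len(score) % m::m])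
-- ===== Notes on version B (the rewrite author's own statement) =====
-- stated objective: simpler
-- what changed: B sorts ascending instead of descending and replaces A's per-box slice+min() loop by a single extended slice: after dropping the len(score)%m smallest scores, every m-th element of the ascending order is a box minimum, so the answer is m times the sum of one stride-m slice; B also does not mutate score (A sorts it in place).
-- outside the precondition, e.g. on solution(0, -2, [1, 2, 3]): A returns 0, B returns -8
import Mathlib
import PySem

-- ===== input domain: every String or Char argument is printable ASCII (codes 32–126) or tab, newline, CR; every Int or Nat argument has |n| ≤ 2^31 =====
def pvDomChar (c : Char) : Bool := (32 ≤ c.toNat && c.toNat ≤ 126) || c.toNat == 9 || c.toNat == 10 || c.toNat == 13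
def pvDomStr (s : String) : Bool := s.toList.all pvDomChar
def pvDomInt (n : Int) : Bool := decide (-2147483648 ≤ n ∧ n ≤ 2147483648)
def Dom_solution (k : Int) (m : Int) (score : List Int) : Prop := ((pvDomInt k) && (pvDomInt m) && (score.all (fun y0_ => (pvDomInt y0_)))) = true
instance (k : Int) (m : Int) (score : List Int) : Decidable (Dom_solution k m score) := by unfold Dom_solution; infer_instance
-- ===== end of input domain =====

-- B sorts ASCENDING and takes one extended slice (every m-th element after the
-- len % m smallest), replacing A's per-box slice + min() loop; objective: simpler.
-- Side effects differ: A sorts `score` in place (descending), B does not mutate it;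
-- the equivalence proved here is about the RETURN value.

-- ===== PORT A =====
def solution (k : Int) (m : Int) (score : List Int) : Int :=
  let s : Int := PySem.List.len score
  let n : Int := PySem.Int.floordiv s m
  let sc : List Int := PySem.List.sorted score (fun x => x) true
  let st : Int × Int :=
    (PySem.List.pyRange 0 n 1).foldl
      (fun (st : Int × Int) _ =>
        let l := PySem.List.slice sc (some st.2) (some (st.2 + m))
        match PySem.List.min? l (fun x => x) with
        | some v => (st.1 + v * m, st.2 + m)
        | none => (st.1, st.2 + m))   -- unreachable under Pre_ (every box slice is nonempty)
      (0, 0)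
  st.1

-- ===== PORT B =====
def solution_alt (k : Int) (m : Int) (score : List Int) : Int :=
  match PySem.List.slice? (PySem.List.sorted score (fun x => x) false)
      (some (PySem.Int.mod (PySem.List.len score) m)) none m with
  | some l => m * l.sum
  | none => 0   -- unreachable under Pre_ (the slice step m is nonzero)

-- ===== PRECONDITION & SPEC =====
-- Pre_ restricts to the task's natural domain of positive box sizes: on m = 0 A raises
-- ZeroDivisionError (B too); on m < 0 A returns 0 (empty range) while B's extended slice
-- steps backwards — a meaningless input no caller of this grading task supplies.
def Pre_solution (k : Int) (m : Int) (score : List Int) : Prop := 1 ≤ m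
instance (k : Int) (m : Int) (score : List Int) : Decidable (Pre_solution k m score) := by unfold Pre_solution; infer_instance

def pvWitness_solution : Int × Int × List Int := (0, 2, [1, 2, 3, 4, 5])

def Spec_solution (k : Int) (m : Int) (score : List Int) (out : Int) : Prop := out = solution_alt k m score
instance (k : Int) (m : Int) (score : List Int) (out : Int) : Decidable (Spec_solution k m score out) := by unfold Spec_solution; infer_instance

-- ===== CLAIM (what is proved, stated in full; the proofs are below) =====
def Claim_equal_solution : Prop := ∀ (k : Int) (m : Int) (score : List Int), Dom_solution k m score → Pre_solution k m score → Spec_solution k m score (solution k m score)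

-- ===== LEMMAS AND PROOFS =====

-- In a descending list the last element is a lower bound for every element.
theorem getLast_le_of_desc (l : List Int) (h : l ≠ [])
    (hp : l.Pairwise (fun a b : Int => b ≤ a)) :
    ∀ x ∈ l, l.getLast h ≤ x := by
  intro x hx
  rw [List.pairwise_iff_getElem] at hp
  obtain ⟨i, hi, rfl⟩ := List.mem_iff_getElem.1 hx
  rw [List.getLast_eq_getElem]
  rcases lt_or_eq_of_le (Nat.le_sub_one_of_lt hi) with hlt | heq
  · exact hp i (l.length - 1) hi (by omega) hlt
  · simp [heq]

-- min() of a nonempty descending list is its last element.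
theorem min?_eq_getLast_of_desc (l : List Int) (h : l ≠ [])
    (hp : l.Pairwise (fun a b : Int => b ≤ a)) :
    PySem.List.min? l (fun x => x) = some (l.getLast h) := by
  rcases hv : PySem.List.min? l (fun x => x) with _ | v
  · exact absurd ((PySem.List.min?_eq_none_iff l (fun x => x)).1 hv) h
  · have hmem := PySem.List.min?_mem hv
    have hmin := PySem.List.min?_isMin hv
    have h1 : v ≤ l.getLast h := hmin _ (List.getLast_mem h)
    have h2 : l.getLast h ≤ v := getLast_le_of_desc l h hp v hmem
    exact congrArg some (le_antisymm h2 h1).symm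

-- min() of the box starting at `com` in a descending list is the element at com+m-1.
theorem min_slice_desc (t : List Int) (hp : t.Pairwise (fun a b : Int => b ≤ a))
    (com m : Int) (h0 : 0 ≤ com) (hm : 0 < m) (hle : com + m ≤ (t.length : Int)) :
    PySem.List.min? (PySem.List.slice t (some com) (some (com + m))) (fun x => x) =
      some (PySem.List.pyGetD t (com + m - 1) 0) := by
  set a := com.toNat with ha
  have hldef : PySem.List.slice t (some com) (some (com + m)) =
      List.take m.toNat (List.drop a t) := by
    rw [PySem.List.slice_toNat t h0 (by omega)]
    congr 1
    omega
  have hmlen : a + m.toNat ≤ t.length := by omega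
  have llen : (List.take m.toNat (List.drop a t)).length = m.toNat := by
    simp [List.length_take, List.length_drop]; omega
  have hne : List.take m.toNat (List.drop a t) ≠ [] := by
    intro hnil; rw [hnil] at llen; simp at llen; omega
  have hpl : (List.take m.toNat (List.drop a t)).Pairwise (fun a b : Int => b ≤ a) :=
    (hp.sublist (List.drop_sublist a t)).sublist (List.take_sublist _ _)
  rw [hldef, min?_eq_getLast_of_desc _ hne hpl]
  congr 1
  rw [List.getLast_eq_getElem, PySem.List.pyGetD_eq_getElem t 0 (by omega) (by push_cast; omega)]
  rw [List.getElem_take, List.getElem_drop]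
  congr 1
  omega

-- Loop invariant: after j iterations A's answer is m times the strided sum of
-- the first j box minima, and com = j*m.
theorem loop_eq (t : List Int) (m : Int) (hm : 0 < m)
    (hp : t.Pairwise (fun a b : Int => b ≤ a))
    (j : Nat) (hj : (j : Int) * m ≤ (t.length : Int)) :
    (PySem.List.pyRange 0 (j : Int) 1).foldl
      (fun (st : Int × Int) _ =>
        match PySem.List.min? (PySem.List.slice t (some st.2) (some (st.2 + m))) (fun x => x) with
        | some v => (st.1 + v * m, st.2 + m)
        | none => (st.1, st.2 + m))
      (0, 0) =
    (m * ((PySem.List.pyRange 1 ((j : Int) + 1) 1).map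
            (fun i => PySem.List.pyGetD t (i * m - 1) 0)).sum, (j : Int) * m) := by
  induction j with
  | zero =>
      rw [PySem.List.pyRange_one_eq_nil (by omega), PySem.List.pyRange_one_eq_nil (by omega)]
      simp
  | succ j ih =>
      have hj' : (j : Int) * m ≤ (t.length : Int) := by
        nlinarith [Int.natCast_nonneg j, hj, hm, Nat.cast_add_one (R := Int) j]
      have ih' := ih hj'
      have hsplit : PySem.List.pyRange 0 ((j : Int) + 1) 1 =
          PySem.List.pyRange 0 (j : Int) 1 ++ [(j : Int)] :=
        PySem.List.pyRange_one_succ_right (by omega)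
      have hsplit2 : PySem.List.pyRange 1 ((j : Int) + 1 + 1) 1 =
          PySem.List.pyRange 1 ((j : Int) + 1) 1 ++ [(j : Int) + 1] :=
        PySem.List.pyRange_one_succ_right (by omega)
      push_cast
      rw [hsplit, List.foldl_append, ih', hsplit2, List.map_append, List.sum_append]
      have hbox := min_slice_desc t hp ((j : Int) * m) m
        (mul_nonneg (Int.natCast_nonneg j) (le_of_lt hm)) hm
        (by push_cast at hj; nlinarith)
      have hidx : ((j : Int) + 1) * m - 1 = (j : Int) * m + m - 1 := by ring
      simp only [List.foldl_cons, List.foldl_nil, hbox, List.map_cons, List.map_nil,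
        List.sum_cons, List.sum_nil, hidx, Prod.mk.injEq]
      constructor <;> ring

-- Summing g over range n back-to-front equals summing it front-to-back.
theorem sum_map_range_reflect (g : Nat → Int) (n : Nat) :
    ((List.range n).map (fun k => g (n - 1 - k))).sum = ((List.range n).map g).sum := by
  induction n with
  | zero => simp
  | succ n ih =>
      have hL : (List.range (n + 1)).map (fun k => g (n + 1 - 1 - k)) =
          g n :: (List.range n).map (fun k => g (n - 1 - k)) := by
        rw [List.range_succ_eq_map, List.map_cons, List.map_map]
        simp only [Nat.add_sub_cancel, Nat.sub_zero]
        congr 1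
        apply List.map_congr_left
        intro k _
        simp only [Function.comp_apply, Nat.succ_eq_add_one]
        congr 1
        omega
      rw [hL, List.range_succ, List.map_append, List.sum_append, List.sum_cons, ih]
      simp [add_comm]

-- filterMap of an everywhere-some function is a map.
theorem filterMap_some_eq_map {A B : Type} (f : A → B) (l : List A) :
    l.filterMap (fun x => some (f x)) = l.map f := by
  simp

-- B's extended slice sorted(score)[r::m] (m > 0, r = s % m) is exactly the list of
-- box minima read from the ascending order.
theorem slice_step_eq (a : List Int) (m r nn : Int) (hm : 0 < m)
    (hr0 : 0 ≤ r) (hrm : r < m) (hsum : nn * m + r = (a.length : Int)) :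
    PySem.List.slice? a (some r) none m =
      some ((List.range nn.toNat).map (fun k : Nat => PySem.List.pyGetD a (r + m * (k : Int)) 0)) := by
  have hnn : 0 ≤ nn := by nlinarith
  have hnm : 0 ≤ nn * m := mul_nonneg hnn (le_of_lt hm)
  have hstart : PySem.List.sliceIndices a.length (some r) none m = (r, (a.length : Int), m) := by
    simp only [PySem.List.sliceIndices]
    have : ¬ m < 0 := by omega
    simp only [this, if_false, if_neg (by omega : ¬ r < 0)]
    congr 1
    omega
  unfold PySem.List.slice?
  rw [if_neg (by omega : ¬ m = 0), hstart]
  simp only [if_pos hm]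
  have hcount : (if r < (a.length : Int) then ((((a.length : Int) - r + m - 1) / m)).toNat else 0)
      = nn.toNat := by
    by_cases hcase : r < (a.length : Int)
    · rw [if_pos hcase]
      have hdiv : ((a.length : Int) - r + m - 1) / m = nn := by
        have h1 : (a.length : Int) - r + m - 1 = (m - 1) + m * nn := by
          rw [mul_comm m nn]; omega
        rw [h1, Int.add_mul_ediv_left (m - 1) nn (by omega : m ≠ 0),
            Int.ediv_eq_zero_of_lt (by omega) (by omega)]
        omega
      rw [hdiv]
    · rw [if_neg hcase]
      have : nn = 0 := by nlinarith
      omega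
  rw [hcount]
  congr 1
  have hmap : ∀ x ∈ List.range nn.toNat,
      a[(r + m * (x : Int)).toNat]? = some (PySem.List.pyGetD a (r + m * (x : Int)) 0) := by
    intro x hx
    have hxlt : (x : Int) < nn := by
      have := List.mem_range.1 hx
      omega
    have hlt : r + m * (x : Int) < (a.length : Int) := by nlinarith
    have h0 : 0 ≤ r + m * (x : Int) := by positivity
    rw [PySem.List.pyGetD_eq_getElem a 0 h0 hlt]
    exact List.getElem?_eq_getElem (by omega)
  rw [List.filterMap_congr hmap, filterMap_some_eq_map]

-- ===== VERDICT (by name: the statement is the Claim_ definition above) =====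
theorem solution_spec : Claim_equal_solution := by
  intro k m score _ hpre
  have hm : 0 < m := hpre
  unfold Spec_solution solution solution_alt
  set t := PySem.List.sorted score (fun x => x) true with ht
  set a := PySem.List.sorted score (fun x => x) false with ha
  have hlent : t.length = score.length := PySem.List.length_sorted ..
  have hlena : a.length = score.length := PySem.List.length_sorted ..
  have hpt : t.Pairwise (fun x y : Int => y ≤ x) := by
    have := PySem.List.sorted_pairwise_rev score (fun x => x)
    simpa using this
  -- descending sort = reverse of ascending sort (as value lists)
  have hta : t = a.reverse := by
    have hrevperm : t.reverse.Perm score := (List.reverse_perm t).trans (PySem.List.sorted_perm ..)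
    have hrevpair : t.reverse.Pairwise (fun x y : Int => x ≤ y) :=
      List.pairwise_reverse.2 hpt
    have : a = t.reverse := PySem.List.sorted_id_eq_of_perm_of_pairwise score t.reverse hrevperm hrevpair
    rw [this, List.reverse_reverse]
  simp only [PySem.List.len_eq]
  set s : Int := (score.length : Int) with hs
  set n : Int := PySem.Int.floordiv s m with hn
  set r : Int := PySem.Int.mod s m with hr
  have hfm : n * m + r = s := by rw [hn, hr]; exact PySem.Int.floordiv_mul_add_mod s m
  have hr0 : 0 ≤ r := PySem.Int.mod_nonneg s hm
  have hrm : r < m := PySem.Int.mod_lt s hm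
  have hnn : 0 ≤ n := by nlinarith [Int.natCast_nonneg score.length]
  have hsa : (a.length : Int) = s := by rw [hlena]
  -- evaluate B's slice
  rw [slice_step_eq a m r n hm hr0 hrm (by rw [hsa]; exact hfm)]
  -- evaluate A's loop
  have hcast : ((n.toNat : Int)) = n := Int.toNat_of_nonneg hnn
  have hloop := loop_eq t m hm hpt n.toNat (by rw [hlent, ← hs, hcast]; nlinarith)
  rw [hcast] at hloop
  rw [hloop]
  -- both are m * a strided sum; reindex A's descending sum into B's ascending one
  have hrange : PySem.List.pyRange 1 (n + 1) 1 =
      (List.range n.toNat).map (fun k : Nat => (1 : Int) + (k : Int)) := by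
    rw [PySem.List.pyRange_one]
    congr 2
    omega
  rw [hrange, List.map_map]
  have hpoint : ∀ x ∈ List.range n.toNat,
      ((fun i => PySem.List.pyGetD t (i * m - 1) 0) ∘ fun k : Nat => (1 : Int) + (k : Int)) x
        = (fun k : Nat => PySem.List.pyGetD a (r + m * ((n.toNat - 1 - k : Nat) : Int)) 0) x := by
    intro x hx
    have hxn : x < n.toNat := List.mem_range.1 hx
    have hxi : (x : Int) < n := by omega
    simp only [Function.comp_apply]
    have hi1lt : ((1 : Int) + (x : Int)) * m - 1 < (t.length : Int) := by
      rw [hlent, ← hs]; nlinarith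
    have hi10 : (0 : Int) ≤ ((1 : Int) + (x : Int)) * m - 1 := by nlinarith [Int.natCast_nonneg x]
    have hi2lt : r + m * ((n.toNat - 1 - x : Nat) : Int) < (a.length : Int) := by
      have : ((n.toNat - 1 - x : Nat) : Int) ≤ n - 1 := by omega
      nlinarith
    have hi20 : (0 : Int) ≤ r + m * ((n.toNat - 1 - x : Nat) : Int) := by positivity
    rw [PySem.List.pyGetD_eq_getElem t 0 hi10 hi1lt,
        PySem.List.pyGetD_eq_getElem a 0 hi20 hi2lt]
    have hrevidx : (((1 : Int) + (x : Int)) * m - 1).toNat < a.reverse.length := by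
      rw [List.length_reverse]; omega
    simp only [hta, List.getElem_reverse]
    congr 1
    have hcc : ((n.toNat - 1 - x : Nat) : Int) = n - 1 - (x : Int) := by omega
    have hadd : ((1 : Int) + (x : Int)) * m - 1 + (r + m * ((n.toNat - 1 - x : Nat) : Int))
        = (a.length : Int) - 1 := by
      rw [hcc]; linear_combination hfm - hsa
    omega
  rw [List.map_congr_left hpoint]
  exact congrArg (fun z => m * z)
    (sum_map_range_reflect (fun k : Nat => PySem.List.pyGetD a (r + m * (k : Int)) 0) n.toNat)
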